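-- pv_equiv track=rewrite | github.com/gmendonc/eBook_Manager | adapters/enrichers/default_enricher.py | _match_topics_to_taxonomy
-- ===== SOURCE A (Python) =====
-- from typing import Dict, Any, Optional, List
--
-- def _match_topics_to_taxonomy(topics: List[str], temas: Dict[str, List[str]]) -> List[str]:
--     """
--     Associa tópicos extraídos à taxonomia de temas.
--
--     Args:
--         topics: Lista de tópicos extraídos do texto
--         temas: Dicionário de temas para classificação
--
--     Returns:
--         Lista de temas da taxonomia que melhor correspondem
--     """
--     if not temas or not topics:
--         return []
--
--     matched_themes = []
--
--     # Para cada tópico extraído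
--     for topic in topics:
--         # Verificar se há correspondência direta na taxonomia
--         for theme, subtemas in temas.items():
--             # Verificar tema principal
--             if topic in theme.lower():
--                 if theme not in matched_themes:
--                     matched_themes.append(theme)
--                 continue
--
--             # Verificar subtemas
--             for subtema in subtemas:
--                 if topic in subtema.lower():
--                     if subtema not in matched_themes:
--                         matched_themes.append(subtema)
--                     break
--
--     # Limitar a 5 temas para não sobrecarregar
--     return matched_themes[:5]
-- ===== SOURCE B (Python) =====
-- def _match_topics_to_taxonomy(topics, temas):
--     if not temas or not topics:
--         return []
--
--     entries = list(temas.items())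
--     L = len(entries)
--
--     # Transposed traversal: scan the taxonomy once per entry (lowering each
--     # name a single time), and record for every matched name the MINIMAL
--     # emission position i*L+j (topic index i, entry index j).  The first
--     # occurrence in A's topic-major order is exactly the minimal position,
--     # so sorting by position recovers A's first-seen order.
--     first = {}
--     for j, (theme, subtemas) in enumerate(entries):
--         tl = theme.lower()
--         subs = [(s, s.lower()) for s in subtemas]
--         for i, topic in enumerate(topics):
--             if topic in tl:
--                 name = theme
--             else:
--                 name = next((s for s, sl in subs if topic in sl), None)
--                 if name is None:
--                     continue
--             p = i * L + j
--             if name not in first or p < first[name]: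
--                 first[name] = p
--
--     return [name for name, _ in sorted(first.items(), key=lambda kv: kv[1])][:5]
-- ===== Notes on version B (the rewrite author's own statement) =====
-- stated objective: faster
-- what changed: B transposes the traversal (taxonomy-major instead of topic-major), lowercases each theme/subtema once instead of once per topic, records for every matched name its minimal emission position i*L+j in a dict, and recovers A's first-seen order by sorting the dict items by position and truncating to 5 - replacing A's streaming dedup via 'not in matched_themes' list scans.
import Mathlib
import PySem

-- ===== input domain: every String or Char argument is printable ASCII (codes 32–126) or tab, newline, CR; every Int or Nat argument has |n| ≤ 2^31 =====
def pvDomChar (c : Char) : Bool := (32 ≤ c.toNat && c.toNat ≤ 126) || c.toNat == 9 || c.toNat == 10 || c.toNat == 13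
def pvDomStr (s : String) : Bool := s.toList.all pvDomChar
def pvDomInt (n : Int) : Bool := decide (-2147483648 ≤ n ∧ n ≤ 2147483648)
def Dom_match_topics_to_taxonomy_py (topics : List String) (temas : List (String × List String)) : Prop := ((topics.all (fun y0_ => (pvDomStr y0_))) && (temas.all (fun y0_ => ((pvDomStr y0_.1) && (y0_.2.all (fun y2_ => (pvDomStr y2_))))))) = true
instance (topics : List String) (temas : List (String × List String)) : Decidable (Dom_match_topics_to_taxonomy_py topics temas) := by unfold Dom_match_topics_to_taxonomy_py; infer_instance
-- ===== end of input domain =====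

-- B transposes the loops (taxonomy-major), lowercases each name once, keeps the minimal
-- emission position per matched name in a dict and sorts by it — same return value as A.

-- ===== PORT A =====
-- inner 'for subtema in subtemas: … break' loop of A
def pvASubLoop (topic : String) (subtemas : List String) (acc : List String) : List String :=
  match subtemas with
  | [] => acc
  | s :: rest =>
    if PySem.Str.isIn topic (PySem.Str.lower s) then
      (if s ∈ acc then acc else acc ++ [s])
    else pvASubLoop topic rest acc

def match_topics_to_taxonomy_py (topics : List String) (temas : List (String × List String)) : List String :=
  if temas.isEmpty || topics.isEmpty then []
  else
    let matched := topics.foldl (fun acc topic =>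
      temas.foldl (fun acc p =>
        if PySem.Str.isIn topic (PySem.Str.lower p.1) then
          (if p.1 ∈ acc then acc else acc ++ [p.1])
        else pvASubLoop topic p.2 acc) acc) []
    matched.take 5

-- ===== PORT B =====
-- body of Source B's inner loop: one enumerated (topic, entry) pair updates the minimum-position dict
-- ('name not in first or p < first[name]' reads first[name] only under 'name in first', so getD is exact)
def pvBUpd (L : Int) (j : Int) (theme : String) (tl : String) (subs : List (String × String))
    (d : PySem.Dict String Int) (it : Int × String) : PySem.Dict String Int :=
  let name? := if PySem.Str.isIn it.2 tl then some theme
               else (subs.find? (fun q => PySem.Str.isIn it.2 q.2)).map Prod.fst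
  match name? with
  | none => d
  | some name =>
    let p := it.1 * L + j
    if (!(d.contains name)) || p < d.getD name 0 then d.insert name p else d

def match_topics_to_taxonomy_py_alt (topics : List String) (temas : List (String × List String)) : List String :=
  if temas.isEmpty || topics.isEmpty then []
  else
    let L : Int := temas.length
    let first := (PySem.List.enumerate temas 0).foldl (fun d jp =>
      (PySem.List.enumerate topics 0).foldl
        (pvBUpd L jp.1 jp.2.1 (PySem.Str.lower jp.2.1) (jp.2.2.map (fun s => (s, PySem.Str.lower s)))) d)
      PySem.Dict.empty
    ((PySem.List.sorted first.items (fun kv => kv.2)).map Prod.fst).take 5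

-- ===== PRECONDITION & SPEC =====
def Spec_match_topics_to_taxonomy_py (topics : List String) (temas : List (String × List String)) (out : List String) : Prop := out = match_topics_to_taxonomy_py_alt topics temas
instance (topics : List String) (temas : List (String × List String)) (out : List String) : Decidable (Spec_match_topics_to_taxonomy_py topics temas out) := by unfold Spec_match_topics_to_taxonomy_py; infer_instance

-- ===== CLAIM (what is proved, stated in full; the proofs are below) =====
def Claim_equal_match_topics_to_taxonomy_py : Prop := ∀ (topics : List String) (temas : List (String × List String)), Dom_match_topics_to_taxonomy_py topics temas → Spec_match_topics_to_taxonomy_py topics temas (match_topics_to_taxonomy_py topics temas)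

-- ===== LEMMAS AND PROOFS =====

-- the candidate a (topic, taxonomy entry) pair emits: the theme on a direct hit, else the first matching subtema
def pvCand (topic : String) (p : String × List String) : Option String :=
  if PySem.Str.isIn topic (PySem.Str.lower p.1) then some p.1
  else p.2.find? (fun s => PySem.Str.isIn topic (PySem.Str.lower s))

-- the emission stream with positions i*L+j, in A's topic-major order / in B's taxonomy-major order
def pvEmitA (topics : List String) (temas : List (String × List String)) (L : Int) : List (String × Int) :=
  (PySem.List.enumerate topics 0).flatMap (fun it =>
    (PySem.List.enumerate temas 0).filterMap (fun jp =>
      (pvCand it.2 jp.2).map (fun n => (n, it.1 * L + jp.1))))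

def pvEmitB (topics : List String) (temas : List (String × List String)) (L : Int) : List (String × Int) :=
  (PySem.List.enumerate temas 0).flatMap (fun jp =>
    (PySem.List.enumerate topics 0).filterMap (fun it =>
      (pvCand it.2 jp.2).map (fun n => (n, it.1 * L + jp.1))))

-- first occurrence of each name, in order
def pvFirstOcc : List (String × Int) → List (String × Int)
  | [] => []
  | e :: rest => e :: pvFirstOcc (rest.filter (fun x => x.1 ≠ e.1))
termination_by E => E.length
decreasing_by exact Nat.lt_succ_of_le (le_trans (le_of_eq List.length_unattach) ((List.length_filter_le _ _).trans (le_of_eq List.length_attach)))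

-- min-update step of B's fold, and its effect on one lookup
def pvMinStep (d : PySem.Dict String Int) (e : String × Int) : PySem.Dict String Int :=
  if (!(d.contains e.1)) || e.2 < d.getD e.1 0 then d.insert e.1 e.2 else d

def pvMinUpd (n : String) (o : Option Int) (e : String × Int) : Option Int :=
  if e.1 = n then some (match o with | none => e.2 | some q => min q e.2) else o

-- ---- A side: the nested loops are a Set.add fold over the candidate stream ----

theorem pvASubLoop_eq (topic : String) (subtemas : List String) (acc : List String) :
    pvASubLoop topic subtemas acc =
      match subtemas.find? (fun s => PySem.Str.isIn topic (PySem.Str.lower s)) with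
      | none => acc
      | some s => (if s ∈ acc then acc else acc ++ [s]) := by
  induction subtemas with
  | nil => simp [pvASubLoop]
  | cons s rest ih =>
    by_cases h : PySem.Chars.isIn topic.toList (PySem.Chars.lower s.toList) = true
    · simp [pvASubLoop, List.find?, h]
    · simp [pvASubLoop, List.find?, h, ih]

theorem pvIns_eq_add (acc : List String) (x : String) :
    (if x ∈ acc then acc else acc ++ [x]) = PySem.Set.add acc x := by
  simp [PySem.Set.add, PySem.Set.contains]

theorem pvStepA_eq (topic : String) (p : String × List String) (acc : List String) :
    (if PySem.Str.isIn topic (PySem.Str.lower p.1) then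
        (if p.1 ∈ acc then acc else acc ++ [p.1])
      else pvASubLoop topic p.2 acc) =
    match pvCand topic p with
    | none => acc
    | some c => PySem.Set.add acc c := by
  by_cases h : PySem.Chars.isIn topic.toList (PySem.Chars.lower p.1.toList) = true
  · simp [pvCand, h, pvIns_eq_add]
  · simp only [pvCand, pvASubLoop_eq]
    cases hf : List.find? (fun s => PySem.Chars.isIn topic.toList (PySem.Chars.lower s.toList)) p.2 with
    | none => simp [h, hf]
    | some c => simp [h, hf, pvIns_eq_add]

theorem pvA_matched (topics : List String) (temas : List (String × List String)) :
    topics.foldl (fun acc topic =>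
      temas.foldl (fun acc p =>
        if PySem.Str.isIn topic (PySem.Str.lower p.1) then
          (if p.1 ∈ acc then acc else acc ++ [p.1])
        else pvASubLoop topic p.2 acc) acc) [] =
    (topics.flatMap (fun t => temas.filterMap (fun p => pvCand t p))).foldl PySem.Set.add [] := by
  rw [List.foldl_flatMap]
  apply PySem.List.foldl_congr_mem
  intro acc t _
  rw [List.foldl_filterMap]
  apply PySem.List.foldl_congr_mem
  intro acc' p _
  rw [pvStepA_eq]
  cases pvCand t p <;> rfl

-- ---- the two emission streams: projection, same members, A's is position-sorted ----

theorem pvEmitA_map_fst (topics : List String) (temas : List (String × List String)) (L : Int) :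
    (pvEmitA topics temas L).map Prod.fst = topics.flatMap (fun t => temas.filterMap (fun p => pvCand t p)) := by
  unfold pvEmitA
  rw [List.map_flatMap]
  conv_rhs => rw [← PySem.List.map_snd_enumerate topics 0, List.flatMap_map]
  congr 1
  funext it
  rw [List.map_filterMap]
  conv_rhs => rw [← PySem.List.map_snd_enumerate temas 0, List.filterMap_map]
  congr 1
  funext jp
  show ((pvCand it.2 jp.2).map (fun n => (n, it.1 * L + jp.1))).map Prod.fst = pvCand it.2 jp.2
  cases pvCand it.2 jp.2 <;> rfl

theorem pvMem_emitA_iff_emitB (topics : List String) (temas : List (String × List String)) (L : Int) (e : String × Int) :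
    e ∈ pvEmitA topics temas L ↔ e ∈ pvEmitB topics temas L := by
  unfold pvEmitA pvEmitB
  simp only [List.mem_flatMap, List.mem_filterMap]
  tauto

theorem pvEmitA_pairwise (topics : List String) (temas : List (String × List String)) (L : Int)
    (hL : L = temas.length) :
    (pvEmitA topics temas L).Pairwise (fun a b => a.2 < b.2) := by
  unfold pvEmitA
  rw [List.pairwise_flatMap]
  constructor
  · intro it _
    apply List.Pairwise.filterMap _ _ (PySem.List.pairwise_lt_enumerate temas 0)
    intro jp jp' hlt b hb b' hb'
    obtain ⟨n, hn, rfl⟩ := Option.map_eq_some_iff.mp hb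
    obtain ⟨n', hn', rfl⟩ := Option.map_eq_some_iff.mp hb'
    simpa using hlt
  · apply List.Pairwise.imp_of_mem _ (PySem.List.pairwise_lt_enumerate topics 0)
    intro it it' hit hit' hlt x hx y hy
    simp only [List.mem_filterMap] at hx hy
    obtain ⟨jp, hjp, hx⟩ := hx
    obtain ⟨jp', hjp', hy⟩ := hy
    obtain ⟨n, hn, rfl⟩ := Option.map_eq_some_iff.mp hx
    obtain ⟨n', hn', rfl⟩ := Option.map_eq_some_iff.mp hy
    rw [PySem.List.mem_enumerate_iff] at hjp hjp'
    obtain ⟨k, hk, rfl⟩ := hjp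
    obtain ⟨k', hk', rfl⟩ := hjp'
    rw [PySem.List.mem_enumerate_iff] at hit hit'
    obtain ⟨i, hi, rfl⟩ := hit
    obtain ⟨i', hi', rfl⟩ := hit'
    show (0 + (i:Int)) * L + (0 + (k:Int)) < (0 + (i':Int)) * L + (0 + (k':Int))
    have h1 : (i:Int) < (i':Int) := by simpa using hlt
    have h2 : (k : Int) < L := by omega
    have h3 : ((i:Int) + 1) * L ≤ (i':Int) * L :=
      mul_le_mul_of_nonneg_right (by omega) (by omega)
    nlinarith [h3]

-- ---- A's dedup fold is pvFirstOcc of the stream, projected ----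

theorem pvFold_add_aux (N : Nat) (E : List (String × Int)) (hN : E.length ≤ N) (acc : List String) :
    (E.map Prod.fst).foldl PySem.Set.add acc =
      acc ++ (pvFirstOcc (E.filter (fun e => e.1 ∉ acc))).map Prod.fst := by
  induction N generalizing E acc with
  | zero =>
    have : E = [] := List.length_eq_zero_iff.mp (Nat.le_zero.mp hN)
    subst this; simp [pvFirstOcc]
  | succ N ih =>
    cases E with
    | nil => simp [pvFirstOcc]
    | cons e rest =>
      simp only [List.map_cons, List.foldl_cons]
      by_cases h : e.1 ∈ acc
      · have hadd : PySem.Set.add acc e.1 = acc := by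
          simp [PySem.Set.add, PySem.Set.contains, h]
        rw [hadd, ih rest (by simpa using Nat.succ_le_succ_iff.mp (by simpa using hN)) acc]
        congr 2
        simp only [List.filter_cons]
        simp [h]
      · have hadd : PySem.Set.add acc e.1 = acc ++ [e.1] := by
          simp [PySem.Set.add, PySem.Set.contains, h]
        rw [hadd, ih rest (by simpa using Nat.succ_le_succ_iff.mp (by simpa using hN)) (acc ++ [e.1])]
        have hfilter : rest.filter (fun x => decide (x.1 ∉ acc ++ [e.1])) =
            (rest.filter (fun x => decide (x.1 ∉ acc))).filter (fun x => decide (x.1 ≠ e.1)) := by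
          rw [List.filter_filter]
          apply List.filter_congr
          intro x _
          simp only [List.mem_append, List.mem_singleton, decide_not]
          rw [show (decide (x.1 ∈ acc ∨ x.1 = e.1)) = (decide (x.1 ∈ acc) || decide (x.1 = e.1)) by simp]
          cases hxa : decide (x.1 ∈ acc) <;> cases hxe : decide (x.1 = e.1) <;> rfl
        have hcons : (e :: rest).filter (fun x => decide (x.1 ∉ acc)) =
            e :: rest.filter (fun x => decide (x.1 ∉ acc)) := by
          simp [h]
        rw [hcons]
        rw [pvFirstOcc]
        simp only [List.map_cons, List.append_assoc, List.singleton_append]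
        congr 2
        rw [hfilter]

theorem pvFold_add_firstOcc (E : List (String × Int)) :
    (E.map Prod.fst).foldl PySem.Set.add [] = (pvFirstOcc E).map Prod.fst := by
  rw [pvFold_add_aux E.length E le_rfl []]
  simp

-- ---- pvFirstOcc: sublist, and membership = "minimal position of the name" on a sorted stream ----

theorem pvFirstOcc_sublist_aux (N : Nat) (E : List (String × Int)) (hN : E.length ≤ N) :
    (pvFirstOcc E).Sublist E := by
  induction N generalizing E with
  | zero =>
    have : E = [] := List.length_eq_zero_iff.mp (Nat.le_zero.mp hN)
    subst this; simp [pvFirstOcc]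
  | succ N ih =>
    cases E with
    | nil => simp [pvFirstOcc]
    | cons e rest =>
      rw [pvFirstOcc]
      apply List.Sublist.cons₂
      exact (ih _ ((List.length_filter_le _ _).trans (by simpa using Nat.succ_le_succ_iff.mp (by simpa using hN)))).trans List.filter_sublist

theorem pvFirstOcc_sublist (E : List (String × Int)) : (pvFirstOcc E).Sublist E :=
  pvFirstOcc_sublist_aux E.length E le_rfl

theorem pvFirstOcc_mem_aux (N : Nat) (E : List (String × Int)) (hN : E.length ≤ N)
    (hp : E.Pairwise (fun a b => a.2 < b.2)) (n : String) (p : Int) :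
    (n, p) ∈ pvFirstOcc E ↔ ((n, p) ∈ E ∧ ∀ q, (n, q) ∈ E → p ≤ q) := by
  induction N generalizing E with
  | zero =>
    have : E = [] := List.length_eq_zero_iff.mp (Nat.le_zero.mp hN)
    subst this; simp [pvFirstOcc]
  | succ N ih =>
    cases E with
    | nil => simp [pvFirstOcc]
    | cons e rest =>
      have hlen : (rest.filter (fun x => decide (x.1 ≠ e.1))).length ≤ N :=
        (List.length_filter_le _ _).trans (by simpa using Nat.succ_le_succ_iff.mp (by simpa using hN))
      have hpf : (rest.filter (fun x => decide (x.1 ≠ e.1))).Pairwise (fun a b => a.2 < b.2) :=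
        (List.pairwise_cons.mp hp).2.sublist List.filter_sublist
      rw [pvFirstOcc]
      constructor
      · intro hmem
        rcases List.mem_cons.mp hmem with heq | hmem'
        · subst heq
          refine ⟨List.mem_cons_self, ?_⟩
          intro q hq
          rcases List.mem_cons.mp hq with heq2 | hq'
          · have h : q = p := by simpa using congrArg Prod.snd heq2
            simp [h]
          · exact le_of_lt ((List.pairwise_cons.mp hp).1 _ hq')
        · obtain ⟨hmemF, hminF⟩ := (ih _ hlen hpf).mp hmem'
          have hne : n ≠ e.1 := by
            have := List.of_mem_filter hmemF
            simpa using this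
          have hmemR : (n, p) ∈ rest := (List.mem_filter.mp hmemF).1
          refine ⟨List.mem_cons_of_mem _ hmemR, ?_⟩
          intro q hq
          rcases List.mem_cons.mp hq with heq2 | hq'
          · exact absurd (by simpa using congrArg Prod.fst heq2 : n = e.1) hne
          · exact hminF q (List.mem_filter.mpr ⟨hq', by simpa using hne⟩)
      · rintro ⟨hmem, hmin⟩
        rcases List.mem_cons.mp hmem with heq | hmem'
        · exact heq ▸ List.mem_cons_self
        · by_cases hne : n = e.1
          · exfalso
            have h1 : p ≤ e.2 := hmin e.2 (by rw [hne]; exact List.mem_cons_self)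
            have h2 : e.2 < p := (List.pairwise_cons.mp hp).1 _ hmem'
            omega
          · apply List.mem_cons_of_mem
            apply (ih _ hlen hpf).mpr
            refine ⟨List.mem_filter.mpr ⟨hmem', by simpa using hne⟩, ?_⟩
            intro q hq
            exact hmin q (List.mem_cons_of_mem _ (List.mem_filter.mp hq).1)

theorem pvFirstOcc_mem_iff (E : List (String × Int)) (hp : E.Pairwise (fun a b => a.2 < b.2))
    (n : String) (p : Int) :
    (n, p) ∈ pvFirstOcc E ↔ ((n, p) ∈ E ∧ ∀ q, (n, q) ∈ E → p ≤ q) :=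
  pvFirstOcc_mem_aux E.length E le_rfl hp n p

-- ---- B's fold: lookups compute the minimum position, keys stay nodup ----

theorem pvMinStep_get? (d : PySem.Dict String Int) (e : String × Int) (n : String) :
    (pvMinStep d e).get? n = pvMinUpd n (d.get? n) e := by
  unfold pvMinStep pvMinUpd
  by_cases hn : e.1 = n
  · subst hn
    cases hq : d.get? e.1 with
    | none =>
      have hc : d.contains e.1 = false := by
        rw [PySem.Dict.contains_eq_isSome_get?, hq]; rfl
      simp [hc, PySem.Dict.get?_insert_self]
    | some q =>
      have hc : d.contains e.1 = true := by
        rw [PySem.Dict.contains_eq_isSome_get?, hq]; rfl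
      have hgd : d.getD e.1 0 = q := by
        rw [PySem.Dict.getD_eq_get?_getD, hq]; rfl
      by_cases hlt : e.2 < q
      · simp [hc, hgd, hlt, PySem.Dict.get?_insert_self, min_eq_right (le_of_lt hlt)]
      · simp [hc, hgd, hlt, hq, min_eq_left (by omega : q ≤ e.2)]
  · by_cases hcond : (!(d.contains e.1)) || e.2 < d.getD e.1 0
    · simp only [hcond, if_true, if_neg hn]
      exact PySem.Dict.get?_insert_of_ne _ _ (fun h => hn h.symm)
    · simp only [Bool.not_eq_true] at hcond
      simp [hcond, hn]

theorem pvFold_minStep_get? (E : List (String × Int)) (d : PySem.Dict String Int) (n : String) :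
    (E.foldl pvMinStep d).get? n = E.foldl (pvMinUpd n) (d.get? n) := by
  induction E generalizing d with
  | nil => rfl
  | cons e rest ih => rw [List.foldl_cons, ih, pvMinStep_get?, List.foldl_cons]

theorem pvFoldMin_none_iff (n : String) (E : List (String × Int)) (o : Option Int) :
    E.foldl (pvMinUpd n) o = none ↔ (o = none ∧ ∀ p, (n, p) ∉ E) := by
  induction E generalizing o with
  | nil => simp
  | cons e rest ih =>
    rw [List.foldl_cons, ih]
    unfold pvMinUpd
    by_cases hn : e.1 = n
    · simp only [hn, if_true]
      constructor
      · rintro ⟨h, -⟩; cases o <;> simp at h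
      · rintro ⟨-, h⟩
        exfalso; exact h e.2 (by simp [← hn])
    · simp only [hn, if_false]
      constructor
      · rintro ⟨h1, h2⟩
        refine ⟨h1, fun p hp => ?_⟩
        rcases List.mem_cons.mp hp with heq | hm
        · exact hn (congrArg Prod.fst heq).symm
        · exact h2 p hm
      · rintro ⟨h1, h2⟩
        exact ⟨h1, fun p hp => h2 p (List.mem_cons_of_mem _ hp)⟩

theorem pvFoldMin_some (n : String) (E : List (String × Int)) (o : Option Int) (m : Int)
    (h : E.foldl (pvMinUpd n) o = some m) :
    (o = some m ∨ (n, m) ∈ E) ∧ (∀ p, (n, p) ∈ E → m ≤ p) ∧ (∀ q, o = some q → m ≤ q) := by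
  induction E generalizing o with
  | nil =>
    simp at h
    exact ⟨Or.inl h, by simp, fun q hq => by rw [h] at hq; exact le_of_eq (Option.some.inj hq)⟩
  | cons e rest ih =>
    rw [List.foldl_cons] at h
    obtain ⟨h1, h2, h3⟩ := ih _ h
    unfold pvMinUpd at h1 h3
    by_cases hn : e.1 = n
    · simp only [hn, if_true] at h1 h3
      cases ho : o with
      | none =>
        rw [ho] at h1 h3
        constructor
        · rcases h1 with h1 | h1
          · right
            have : m = e.2 := by simpa using h1.symm
            rw [this, ← hn]; simp
          · right; exact List.mem_cons_of_mem _ h1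
        refine ⟨fun p hp => ?_, by simp⟩
        rcases List.mem_cons.mp hp with heq | hm
        · have : p = e.2 := by simpa using congrArg Prod.snd heq
          subst this
          exact h3 e.2 rfl
        · exact h2 p hm
      | some q =>
        rw [ho] at h1 h3
        have hm3 : m ≤ min q e.2 := h3 _ rfl
        constructor
        · rcases h1 with h1 | h1
          · have hmm : m = min q e.2 := by simpa using h1.symm
            rcases le_total q e.2 with hle | hle
            · left
              have hq : m = q := by rw [hmm, min_eq_left hle]
              simp [hq]
            · right
              have he2 : m = e.2 := by rw [hmm, min_eq_right hle]
              rw [he2, ← hn]; simp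
          · right; exact List.mem_cons_of_mem _ h1
        refine ⟨fun p hp => ?_, fun q' hq' => ?_⟩
        · rcases List.mem_cons.mp hp with heq | hm
          · have : p = e.2 := by simpa using congrArg Prod.snd heq
            omega
          · exact h2 p hm
        · have hqq : q = q' := by simpa using hq'
          subst hqq
          exact hm3.trans (min_le_left _ _)
    · simp only [hn, if_false] at h1 h3
      constructor
      · rcases h1 with h1 | h1
        · exact Or.inl h1
        · exact Or.inr (List.mem_cons_of_mem _ h1)
      refine ⟨fun p hp => ?_, h3⟩
      rcases List.mem_cons.mp hp with heq | hm
      · exact absurd (congrArg Prod.fst heq).symm (by simpa using hn)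
      · exact h2 p hm

theorem pvMinStep_nodup_keys (E : List (String × Int)) (d : PySem.Dict String Int)
    (h : d.keys.Nodup) : (E.foldl pvMinStep d).keys.Nodup := by
  induction E generalizing d with
  | nil => exact h
  | cons e rest ih =>
    rw [List.foldl_cons]
    apply ih
    unfold pvMinStep
    split
    · exact PySem.Dict.nodup_keys_insert _ _ _ h
    · exact h

-- ---- B's nested enumerate folds are the pvMinStep fold over pvEmitB ----

theorem pvBUpd_eq (L : Int) (jp : Int × (String × List String)) (d : PySem.Dict String Int) (it : Int × String) :
    pvBUpd L jp.1 jp.2.1 (PySem.Str.lower jp.2.1) (jp.2.2.map (fun s => (s, PySem.Str.lower s))) d it =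
    match (pvCand it.2 jp.2).map (fun n => (n, it.1 * L + jp.1)) with
    | some e => pvMinStep d e
    | none => d := by
  have hname : (if PySem.Str.isIn it.2 (PySem.Str.lower jp.2.1) then some jp.2.1
      else ((jp.2.2.map (fun s => (s, PySem.Str.lower s))).find? (fun q => PySem.Str.isIn it.2 q.2)).map Prod.fst)
      = pvCand it.2 jp.2 := by
    unfold pvCand
    rw [List.find?_map, Option.map_map]
    simp [Function.comp_def]
  unfold pvBUpd
  rw [hname]
  cases pvCand it.2 jp.2 with
  | none => rfl
  | some name => rfl

theorem pvB_fold_eq (topics : List String) (temas : List (String × List String)) (L : Int) :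
    (PySem.List.enumerate temas 0).foldl (fun d jp =>
      (PySem.List.enumerate topics 0).foldl
        (pvBUpd L jp.1 jp.2.1 (PySem.Str.lower jp.2.1) (jp.2.2.map (fun s => (s, PySem.Str.lower s)))) d)
      PySem.Dict.empty =
    (pvEmitB topics temas L).foldl pvMinStep PySem.Dict.empty := by
  unfold pvEmitB
  rw [List.foldl_flatMap]
  apply PySem.List.foldl_congr_mem
  intro d jp _
  rw [List.foldl_filterMap]
  apply PySem.List.foldl_congr_mem
  intro d' it _
  rw [pvBUpd_eq]
  cases (pvCand it.2 jp.2).map (fun n => (n, it.1 * L + jp.1)) <;> rfl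

-- ---- the crux: sorting B's dict items by position recovers pvFirstOcc of A's stream ----

theorem pvSorted_items_eq (topics : List String) (temas : List (String × List String)) (L : Int)
    (hL : L = temas.length) :
    PySem.List.sorted ((pvEmitB topics temas L).foldl pvMinStep PySem.Dict.empty).items (fun kv => kv.2) =
      pvFirstOcc (pvEmitA topics temas L) := by
  set d := (pvEmitB topics temas L).foldl pvMinStep PySem.Dict.empty with hd
  set F := pvFirstOcc (pvEmitA topics temas L) with hF
  have hpA := pvEmitA_pairwise topics temas L hL
  have hFpw : F.Pairwise (fun a b => a.2 < b.2) :=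
    hpA.sublist (pvFirstOcc_sublist _)
  have hnodk : d.keys.Nodup :=
    pvMinStep_nodup_keys _ _ (by simp [PySem.Dict.keys_empty])
  have hget : ∀ n, d.get? n = (pvEmitB topics temas L).foldl (pvMinUpd n) none := by
    intro n
    rw [hd, pvFold_minStep_get?, PySem.Dict.get?_empty]
  have hmemd : ∀ n p, (n, p) ∈ d.items ↔
      ((n, p) ∈ pvEmitA topics temas L ∧ ∀ q, (n, q) ∈ pvEmitA topics temas L → p ≤ q) := by
    intro n p
    rw [← PySem.Dict.get?_eq_some_iff_mem_items d n p hnodk, hget]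
    constructor
    · intro hsome
      obtain ⟨h1, h2, -⟩ := pvFoldMin_some n _ none p hsome
      rcases h1 with h1 | h1
      · cases h1
      · exact ⟨(pvMem_emitA_iff_emitB _ _ _ _).mpr h1,
          fun q hq => h2 q ((pvMem_emitA_iff_emitB _ _ _ _).mp hq)⟩
    · rintro ⟨hmem, hmin⟩
      cases hres : (pvEmitB topics temas L).foldl (pvMinUpd n) none with
      | none =>
        exfalso
        exact ((pvFoldMin_none_iff n _ none).mp hres).2 p ((pvMem_emitA_iff_emitB _ _ _ _).mp hmem)
      | some m =>
        obtain ⟨h1, h2, -⟩ := pvFoldMin_some n _ none m hres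
        rcases h1 with h1 | h1
        · cases h1
        · have hmA : (n, m) ∈ pvEmitA topics temas L := (pvMem_emitA_iff_emitB _ _ _ _).mpr h1
          have hle1 : p ≤ m := hmin m hmA
          have hle2 : m ≤ p := h2 p ((pvMem_emitA_iff_emitB _ _ _ _).mp hmem)
          have : m = p := by omega
          rw [this]
  have hFnodup : F.Nodup :=
    hFpw.imp (fun {a b} hlt => fun he => absurd (he ▸ hlt) (lt_irrefl _))
  have hdnodup : d.items.Nodup :=
    List.Nodup.of_map Prod.fst hnodk
  have hperm : F.Perm d.items := by
    rw [List.perm_ext_iff_of_nodup hFnodup hdnodup]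
    intro e
    obtain ⟨n, p⟩ := e
    rw [hmemd, hF, pvFirstOcc_mem_iff _ hpA]
  exact PySem.List.sorted_eq_of_perm_of_pairwise_lt _ _ _ hperm hFpw

-- ===== VERDICT (by name: the statement is the Claim_ definition above) =====
theorem match_topics_to_taxonomy_py_spec : Claim_equal_match_topics_to_taxonomy_py := by
  intro topics temas _
  unfold Spec_match_topics_to_taxonomy_py match_topics_to_taxonomy_py match_topics_to_taxonomy_py_alt
  by_cases h : (temas.isEmpty || topics.isEmpty) = true
  · simp [h]
  · simp only [h, Bool.false_eq_true, if_false]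
    rw [pvA_matched, ← pvEmitA_map_fst topics temas (temas.length : Int), pvFold_add_firstOcc,
      pvB_fold_eq, pvSorted_items_eq topics temas (temas.length : Int) rfl]
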